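-- pv_equiv track=rewrite | github.com/7Cav/cScripts | tools/generate_wiki_articles.py | get_author_link
-- ===== SOURCE A (Python) =====
-- def get_author_link(author=''):
--     names = {
--         #CavName, GithubUser
--         'Brostrom.A': 'ColdEvul',
--         'Dunn.W': 'VinoEtCaseus',
--         'Citarelli.D': 'davidcit646'
--     }
--     for akey in names:
--         author = author.replace(akey,'[{}](https://github.com/{})'.format(akey,names[akey]))
--         continue
--     return author
-- ===== SOURCE B (Python) =====
-- def get_author_link(author=''):
--     # Single left-to-right scan: at each position emit either a markdown link
--     # for the key found there or the character itself; one pass instead of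
--     # three full replacement passes.
--     names = {
--         'Brostrom.A': 'ColdEvul',
--         'Dunn.W': 'VinoEtCaseus',
--         'Citarelli.D': 'davidcit646'
--     }
--     out = []
--     i = 0
--     n = len(author)
--     while i < n:
--         for akey, user in names.items():
--             if author.startswith(akey, i):
--                 out.append('[{}](https://github.com/{})'.format(akey, user))
--                 i += len(akey)
--                 break
--         else:
--             out.append(author[i])
--             i += 1
--     return ''.join(out)
-- ===== Notes on version B (the rewrite author's own statement) =====
-- stated objective: alternative
-- what changed: B replaces the three sequential full-string str.replace passes by a single left-to-right scan that, at each position, emits the markdown link for whichever key starts there (or the character itself), building the output once.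
import Mathlib
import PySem

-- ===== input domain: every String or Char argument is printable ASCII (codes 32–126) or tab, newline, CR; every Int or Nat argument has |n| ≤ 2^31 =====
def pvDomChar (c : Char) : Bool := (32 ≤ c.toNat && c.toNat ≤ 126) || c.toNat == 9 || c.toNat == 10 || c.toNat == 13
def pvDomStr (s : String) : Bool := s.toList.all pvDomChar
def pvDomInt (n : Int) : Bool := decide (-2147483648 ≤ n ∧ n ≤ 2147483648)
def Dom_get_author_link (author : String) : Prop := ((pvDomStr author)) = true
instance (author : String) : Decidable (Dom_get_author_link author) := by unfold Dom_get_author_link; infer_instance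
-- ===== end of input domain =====

-- B replaces three sequential full-string replace passes by one left-to-right scan
-- emitting a link for whichever key starts at each position (objective: alternative).

-- ===== PORT A =====
-- the names dict, in insertion order
def pvNames : List (String × String) :=
  [("Brostrom.A", "ColdEvul"), ("Dunn.W", "VinoEtCaseus"), ("Citarelli.D", "davidcit646")]

def get_author_link (author : String) : String :=
  pvNames.foldl
    (fun a kv =>
      PySem.Str.replace a kv.1 ("[" ++ kv.1 ++ "](https://github.com/" ++ kv.2 ++ ")"))
    author

-- ===== PORT B =====
-- single left-to-right scan over the characters (Source B's while loop; the inner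
-- loop over the 3-entry literal dict is unrolled into the three startswith tests)
def pvScan : List Char → List Char
  | [] => []
  | c :: t =>
    if List.isPrefixOf "Brostrom.A".toList (c :: t) then
      "[Brostrom.A](https://github.com/ColdEvul)".toList ++ pvScan ((c :: t).drop 10)
    else if List.isPrefixOf "Dunn.W".toList (c :: t) then
      "[Dunn.W](https://github.com/VinoEtCaseus)".toList ++ pvScan ((c :: t).drop 6)
    else if List.isPrefixOf "Citarelli.D".toList (c :: t) then
      "[Citarelli.D](https://github.com/davidcit646)".toList ++ pvScan ((c :: t).drop 11)
    else c :: pvScan t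
termination_by s => s.length
decreasing_by all_goals simp

def get_author_link_alt (author : String) : String := String.ofList (pvScan author.toList)

-- ===== PRECONDITION & SPEC =====
-- Pre_ excludes inputs containing the one overlapping occurrence 'Citarelli.Dunn.W'
-- (the suffix 'D' of key 'Citarelli.D' is also the start of key 'Dunn.W'): there A's
-- key-by-key pass order and B's leftmost single-pass order are both defensible
-- resolutions of the overlap and return different strings.
def Pre_get_author_link (author : String) : Prop :=
  PySem.Str.isIn "Citarelli.Dunn.W" author = false
instance (author : String) : Decidable (Pre_get_author_link author) := by
  unfold Pre_get_author_link; infer_instance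

def pvWitness_get_author_link : String := "Brostrom.A and Dunn.W"

def Spec_get_author_link (author : String) (out : String) : Prop := out = get_author_link_alt author
instance (author : String) (out : String) : Decidable (Spec_get_author_link author out) := by unfold Spec_get_author_link; infer_instance

-- ===== CLAIM (what is proved, stated in full; the proofs are below) =====
def Claim_equal_get_author_link : Prop := ∀ (author : String), Dom_get_author_link author → Pre_get_author_link author → Spec_get_author_link author (get_author_link author)

-- ===== LEMMAS AND PROOFS =====

-- single-key replacement as a structural scan (head of the key split off so that
-- the recursion always consumes at least one character)
def pvRep (o : Char) (old new : List Char) : List Char → List Char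
  | [] => []
  | c :: t =>
    if List.isPrefixOf (o :: old) (c :: t) then
      new ++ pvRep o old new ((c :: t).drop (old.length + 1))
    else c :: pvRep o old new t
termination_by s => s.length
decreasing_by all_goals simp

theorem pvRep_go_spec (o : Char) (old new : List Char) :
    ∀ (fuel : Nat) (l acc : List Char), l.length ≤ fuel →
      PySem.Chars.replace.go (o :: old) new fuel l acc = acc.reverse ++ pvRep o old new l := by
  intro fuel
  induction fuel generalizing o old new with
  | zero =>
    intro l acc h
    have hl : l = [] := by cases l <;> simp_all
    subst hl
    simp [PySem.Chars.replace.go, pvRep]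
  | succ f ih =>
    intro l acc h
    cases l with
    | nil => simp [PySem.Chars.replace.go, pvRep]
    | cons c t =>
      rw [PySem.Chars.replace.go]
      by_cases hp : (o :: old).isPrefixOf (c :: t)
      · rw [if_pos hp]
        rw [ih o old new _ _ (by simp at h ⊢; omega)]
        rw [pvRep, if_pos hp]
        simp
      · rw [if_neg hp]
        rw [ih o old new _ _ (by simp at h ⊢; omega)]
        rw [pvRep, if_neg hp]
        simp

theorem replace_eq_pvRep (o : Char) (old new s : List Char) :
    PySem.Chars.replace s (o :: old) new = pvRep o old new s := by
  rw [PySem.Chars.replace]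
  rw [if_neg (by simp)]
  rw [pvRep_go_spec o old new s.length s [] (le_refl _)]
  simp

theorem pvRep_pos (o : Char) (old new s : List Char) (h : (o :: old) <+: s) :
    pvRep o old new s = new ++ pvRep o old new (s.drop (old.length + 1)) := by
  cases s with
  | nil => exact absurd h (by simp)
  | cons c t =>
    rw [pvRep, if_pos (List.isPrefixOf_iff_prefix.mpr h)]

theorem pvRep_neg (o : Char) (old new : List Char) (c : Char) (t : List Char)
    (h : ¬ (o :: old) <+: (c :: t)) :
    pvRep o old new (c :: t) = c :: pvRep o old new t := by
  rw [pvRep, if_neg (fun hh => h (List.isPrefixOf_iff_prefix.mp hh))]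

-- skip a region p in which the key never matches
theorem pvRep_skip (o : Char) (old new : List Char) :
    ∀ (p x : List Char), (∀ i, i < p.length → ¬ (o :: old) <+: ((p ++ x).drop i)) →
      pvRep o old new (p ++ x) = p ++ pvRep o old new x := by
  intro p
  induction p with
  | nil => intro x _; simp
  | cons c q ih =>
    intro x h
    have h0 : ¬ (o :: old) <+: (c :: (q ++ x)) := by
      have := h 0 (by simp)
      simpa using this
    rw [List.cons_append, pvRep_neg o old new c (q ++ x) h0]
    rw [ih x (fun i hi => by have := h (i + 1) (by simp; omega); simpa using this)]
    simp

-- a mismatch visible inside p alone rules the key out at position i whatever follows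
theorem pv_not_prefix_of_take (key : List Char) (p x : List Char) (i : Nat)
    (hi : i ≤ p.length) (h : ¬ ((p.drop i).take key.length <+: key)) :
    ¬ key <+: ((p ++ x).drop i) := by
  intro hpre
  apply h
  have hdrop : (p ++ x).drop i = p.drop i ++ x := by
    rw [List.drop_append]
    rw [Nat.sub_eq_zero_of_le hi]
    simp
  rw [hdrop] at hpre
  have heq := List.prefix_iff_eq_take.mp hpre
  rw [List.take_append] at heq
  exact ⟨_, heq.symm⟩

theorem pvRep_pass (o : Char) (old new p x : List Char)
    (h : ∀ i, i < p.length → ¬ ((p.drop i).take (old.length + 1) <+: (o :: old))) :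
    pvRep o old new (p ++ x) = p ++ pvRep o old new x := by
  apply pvRep_skip
  intro i hi
  exact pv_not_prefix_of_take (o :: old) p x i (le_of_lt hi) (by simpa using h i hi)

-- replacement never creates a '['-free prefix that was not already there
theorem pvRep_reflect (o : Char) (old new : List Char) (hnew : new.head? = some '[') :
    ∀ (n : Nat) (s q : List Char), '[' ∉ q → s.length ≤ n →
      q <+: pvRep o old new s → q <+: s := by
  intro n
  induction n with
  | zero =>
    intro s q hq hs hpre
    have : s = [] := by cases s <;> simp_all
    subst this
    simpa [pvRep] using hpre
  | succ m ih =>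
    intro s q hq hs hpre
    cases s with
    | nil => simpa [pvRep] using hpre
    | cons c t =>
      by_cases hp : (o :: old) <+: (c :: t)
      · rw [pvRep_pos o old new _ hp] at hpre
        cases q with
        | nil => exact List.nil_prefix
        | cons d q' =>
          exfalso
          cases new with
          | nil => simp at hnew
          | cons n0 new' =>
            have hn0 : n0 = '[' := by simpa using hnew
            rw [List.cons_append, List.cons_prefix_cons] at hpre
            exact hq (by simp [hpre.1, hn0])
      · rw [pvRep_neg o old new c t hp] at hpre
        cases q with
        | nil => exact List.nil_prefix
        | cons d q' =>
          rw [List.cons_prefix_cons] at hpre ⊢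
          refine ⟨hpre.1, ih t q' (fun hm => hq (by simp [hm])) (by simp at hs; omega) hpre.2⟩

-- the three passes, in A's order
def pvRep1 (s : List Char) : List Char :=
  pvRep 'B' "rostrom.A".toList "[Brostrom.A](https://github.com/ColdEvul)".toList s
def pvRep2 (s : List Char) : List Char :=
  pvRep 'D' "unn.W".toList "[Dunn.W](https://github.com/VinoEtCaseus)".toList s
def pvRep3 (s : List Char) : List Char :=
  pvRep 'C' "itarelli.D".toList "[Citarelli.D](https://github.com/davidcit646)".toList s


-- pvScan unfoldings
theorem pvScan_K1 (r : List Char) :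
    pvScan ("Brostrom.A".toList ++ r) =
      "[Brostrom.A](https://github.com/ColdEvul)".toList ++ pvScan r := by
  have hp : List.isPrefixOf "Brostrom.A".toList ('B' :: ("rostrom.A".toList ++ r)) = true :=
    List.isPrefixOf_iff_prefix.mpr (List.prefix_append "Brostrom.A".toList r)
  rw [show ("Brostrom.A".toList ++ r) = 'B' :: ("rostrom.A".toList ++ r) from rfl]
  rw [pvScan]
  rw [if_pos hp]
  rw [show ('B' :: ("rostrom.A".toList ++ r)).drop 10 = ("Brostrom.A".toList ++ r).drop ("Brostrom.A".toList.length) from rfl, List.drop_left]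

theorem pvScan_K2 (r : List Char) (h1 : ¬ "Brostrom.A".toList <+: ("Dunn.W".toList ++ r)) :
    pvScan ("Dunn.W".toList ++ r) =
      "[Dunn.W](https://github.com/VinoEtCaseus)".toList ++ pvScan r := by
  have hn1 : ¬ List.isPrefixOf "Brostrom.A".toList ('D' :: ("unn.W".toList ++ r)) = true :=
    fun hh => h1 (List.isPrefixOf_iff_prefix.mp hh)
  have hp : List.isPrefixOf "Dunn.W".toList ('D' :: ("unn.W".toList ++ r)) = true :=
    List.isPrefixOf_iff_prefix.mpr (List.prefix_append "Dunn.W".toList r)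
  rw [show ("Dunn.W".toList ++ r) = 'D' :: ("unn.W".toList ++ r) from rfl]
  rw [pvScan]
  rw [if_neg hn1, if_pos hp]
  rw [show ('D' :: ("unn.W".toList ++ r)).drop 6 = ("Dunn.W".toList ++ r).drop ("Dunn.W".toList.length) from rfl, List.drop_left]

theorem pvScan_K3 (r : List Char)
    (h1 : ¬ "Brostrom.A".toList <+: ("Citarelli.D".toList ++ r))
    (h2 : ¬ "Dunn.W".toList <+: ("Citarelli.D".toList ++ r)) :
    pvScan ("Citarelli.D".toList ++ r) =
      "[Citarelli.D](https://github.com/davidcit646)".toList ++ pvScan r := by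
  have hn1 : ¬ List.isPrefixOf "Brostrom.A".toList ('C' :: ("itarelli.D".toList ++ r)) = true :=
    fun hh => h1 (List.isPrefixOf_iff_prefix.mp hh)
  have hn2 : ¬ List.isPrefixOf "Dunn.W".toList ('C' :: ("itarelli.D".toList ++ r)) = true :=
    fun hh => h2 (List.isPrefixOf_iff_prefix.mp hh)
  have hp : List.isPrefixOf "Citarelli.D".toList ('C' :: ("itarelli.D".toList ++ r)) = true :=
    List.isPrefixOf_iff_prefix.mpr (List.prefix_append "Citarelli.D".toList r)
  rw [show ("Citarelli.D".toList ++ r) = 'C' :: ("itarelli.D".toList ++ r) from rfl]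
  rw [pvScan]
  rw [if_neg hn1, if_neg hn2, if_pos hp]
  rw [show ('C' :: ("itarelli.D".toList ++ r)).drop 11 = ("Citarelli.D".toList ++ r).drop ("Citarelli.D".toList.length) from rfl, List.drop_left]

theorem pvScan_neg (c : Char) (t : List Char)
    (h1 : ¬ "Brostrom.A".toList <+: (c :: t))
    (h2 : ¬ "Dunn.W".toList <+: (c :: t))
    (h3 : ¬ "Citarelli.D".toList <+: (c :: t)) :
    pvScan (c :: t) = c :: pvScan t := by
  rw [pvScan]
  rw [if_neg (fun hh => h1 (List.isPrefixOf_iff_prefix.mp hh))]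
  rw [if_neg (fun hh => h2 (List.isPrefixOf_iff_prefix.mp hh))]
  rw [if_neg (fun hh => h3 (List.isPrefixOf_iff_prefix.mp hh))]

-- per-key behaviour of the three passes
theorem pvRep1_K1 (r : List Char) :
    pvRep1 ("Brostrom.A".toList ++ r) =
      "[Brostrom.A](https://github.com/ColdEvul)".toList ++ pvRep1 r := by
  have hpre : ('B' :: "rostrom.A".toList) <+: ("Brostrom.A".toList ++ r) := List.prefix_append _ _
  rw [pvRep1, pvRep_pos _ _ _ _ hpre]
  rw [show ("rostrom.A".toList.length + 1) = "Brostrom.A".toList.length from by decide, List.drop_left]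
  rfl

theorem pvRep1_K2 (x : List Char) :
    pvRep1 ("Dunn.W".toList ++ x) = "Dunn.W".toList ++ pvRep1 x := by
  exact pvRep_pass _ _ _ _ _ (by decide)

theorem pvRep1_K3 (x : List Char) :
    pvRep1 ("Citarelli.D".toList ++ x) = "Citarelli.D".toList ++ pvRep1 x := by
  exact pvRep_pass _ _ _ _ _ (by decide)

theorem pvRep2_K2 (r : List Char) :
    pvRep2 ("Dunn.W".toList ++ r) =
      "[Dunn.W](https://github.com/VinoEtCaseus)".toList ++ pvRep2 r := by
  have hpre : ('D' :: "unn.W".toList) <+: ("Dunn.W".toList ++ r) := List.prefix_append _ _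
  rw [pvRep2, pvRep_pos _ _ _ _ hpre]
  rw [show ("unn.W".toList.length + 1) = "Dunn.W".toList.length from by decide, List.drop_left]
  rfl

theorem pvRep2_L1 (x : List Char) :
    pvRep2 ("[Brostrom.A](https://github.com/ColdEvul)".toList ++ x) =
      "[Brostrom.A](https://github.com/ColdEvul)".toList ++ pvRep2 x := by
  exact pvRep_pass _ _ _ _ _ (by decide)

theorem pvRep3_K3 (r : List Char) :
    pvRep3 ("Citarelli.D".toList ++ r) =
      "[Citarelli.D](https://github.com/davidcit646)".toList ++ pvRep3 r := by
  have hpre : ('C' :: "itarelli.D".toList) <+: ("Citarelli.D".toList ++ r) := List.prefix_append _ _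
  rw [pvRep3, pvRep_pos _ _ _ _ hpre]
  rw [show ("itarelli.D".toList.length + 1) = "Citarelli.D".toList.length from by decide, List.drop_left]
  rfl

theorem pvRep3_L1 (x : List Char) :
    pvRep3 ("[Brostrom.A](https://github.com/ColdEvul)".toList ++ x) =
      "[Brostrom.A](https://github.com/ColdEvul)".toList ++ pvRep3 x := by
  exact pvRep_pass _ _ _ _ _ (by decide)

theorem pvRep3_L2 (x : List Char) :
    pvRep3 ("[Dunn.W](https://github.com/VinoEtCaseus)".toList ++ x) =
      "[Dunn.W](https://github.com/VinoEtCaseus)".toList ++ pvRep3 x := by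
  exact pvRep_pass _ _ _ _ _ (by decide)

theorem pv_main : ∀ (n : Nat) (s : List Char), s.length ≤ n →
    ¬ ("Citarelli.Dunn.W".toList <:+: s) →
    pvRep3 (pvRep2 (pvRep1 s)) = pvScan s := by
  intro n
  induction n with
  | zero =>
    intro s hs _
    have : s = [] := by cases s <;> simp_all
    subst this
    simp [pvRep1, pvRep2, pvRep3, pvRep, pvScan]
  | succ m ih =>
    intro s hs hbad
    by_cases h1 : "Brostrom.A".toList <+: s
    · obtain ⟨r, rfl⟩ := h1
      rw [pvRep1_K1, pvRep2_L1, pvRep3_L1, pvScan_K1]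
      congr 1
      refine ih r (by simp at hs; omega) (fun h => hbad (h.trans (List.suffix_append _ _).isInfix))
    · by_cases h2 : "Dunn.W".toList <+: s
      · obtain ⟨r, rfl⟩ := h2
        rw [pvRep1_K2, pvRep2_K2, pvRep3_L2, pvScan_K2 r h1]
        congr 1
        refine ih r (by simp at hs; omega) (fun h => hbad (h.trans (List.suffix_append _ _).isInfix))
      · by_cases h3 : "Citarelli.D".toList <+: s
        · obtain ⟨r, rfl⟩ := h3
          have hnot : ¬ "unn.W".toList <+: pvRep1 r := by
            intro hpre
            have hre : "unn.W".toList <+: r :=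
              pvRep_reflect 'B' "rostrom.A".toList _ (by decide) r.length r _ (by decide)
                (le_refl _) hpre
            obtain ⟨w, rfl⟩ := hre
            refine hbad ⟨[], w, ?_⟩
            rw [List.nil_append, ← List.append_assoc]
            exact congrArg (· ++ w) (by decide)
          have hskip : ∀ i, i < ("Citarelli.D".toList).length →
              ¬ "Dunn.W".toList <+: (("Citarelli.D".toList ++ pvRep1 r).drop i) := by
            have hdec : ∀ i, i < 11 → i ≠ 10 →
                ¬ (("Citarelli.D".toList.drop i).take ("Dunn.W".toList.length) <+: "Dunn.W".toList) := by
              decide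
            intro i hi
            by_cases hten : i = 10
            · subst hten
              intro hpre
              rw [List.drop_append] at hpre
              rw [show ("Citarelli.D".toList.drop 10) = ['D'] from by decide] at hpre
              rw [show ((10 : Nat) - "Citarelli.D".toList.length) = 0 from by decide] at hpre
              rw [List.drop_zero] at hpre
              rw [show "Dunn.W".toList = 'D' :: "unn.W".toList from rfl] at hpre
              rw [show (['D'] ++ pvRep1 r) = 'D' :: pvRep1 r from rfl] at hpre
              rw [List.cons_prefix_cons] at hpre
              exact hnot hpre.2
            · exact pv_not_prefix_of_take _ _ _ i (by simp at hi ⊢; omega)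
                (hdec i (by simpa using hi) hten)
          rw [show pvRep1 ("Citarelli.D".toList ++ r) = "Citarelli.D".toList ++ pvRep1 r from pvRep1_K3 r]
          rw [show pvRep2 ("Citarelli.D".toList ++ pvRep1 r) = "Citarelli.D".toList ++ pvRep2 (pvRep1 r) from pvRep_skip _ _ _ _ _ hskip]
          rw [pvRep3_K3, pvScan_K3 r h1 h2]
          congr 1
          refine ih r (by simp at hs; omega) (fun h => hbad (h.trans (List.suffix_append _ _).isInfix))
        · cases s with
          | nil => simp [pvRep1, pvRep2, pvRep3, pvRep, pvScan]
          | cons c t =>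
            have e1 : pvRep1 (c :: t) = c :: pvRep1 t :=
              pvRep_neg _ _ _ _ _ (fun hh => h1 hh)
            have hK2 : ¬ "Dunn.W".toList <+: (c :: pvRep1 t) := by
              intro hpre
              rw [show "Dunn.W".toList = 'D' :: "unn.W".toList from rfl, List.cons_prefix_cons] at hpre
              have := pvRep_reflect 'B' "rostrom.A".toList _ (by decide) t.length t _ (by decide)
                (le_refl _) hpre.2
              exact h2 (by rw [show "Dunn.W".toList = 'D' :: "unn.W".toList from rfl, List.cons_prefix_cons]; exact ⟨hpre.1, this⟩)
            have hK3 : ¬ "Citarelli.D".toList <+: (c :: pvRep2 (pvRep1 t)) := by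
              intro hpre
              rw [show "Citarelli.D".toList = 'C' :: "itarelli.D".toList from rfl, List.cons_prefix_cons] at hpre
              have s2 := pvRep_reflect 'D' "unn.W".toList _ (by decide) (pvRep1 t).length (pvRep1 t) _ (by decide)
                (le_refl _) hpre.2
              have s1 := pvRep_reflect 'B' "rostrom.A".toList _ (by decide) t.length t _ (by decide)
                (le_refl _) s2
              exact h3 (by rw [show "Citarelli.D".toList = 'C' :: "itarelli.D".toList from rfl, List.cons_prefix_cons]; exact ⟨hpre.1, s1⟩)
            rw [e1]
            rw [show pvRep2 (c :: pvRep1 t) = c :: pvRep2 (pvRep1 t) from pvRep_neg _ _ _ _ _ hK2]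
            rw [show pvRep3 (c :: pvRep2 (pvRep1 t)) = c :: pvRep3 (pvRep2 (pvRep1 t)) from pvRep_neg _ _ _ _ _ hK3]
            rw [pvScan_neg c t h1 h2 h3]
            congr 1
            refine ih t (by simp at hs; omega) (fun h => hbad (h.trans (List.suffix_cons c t).isInfix))

-- ===== VERDICT (by name: the statement is the Claim_ definition above) =====
theorem get_author_link_spec : Claim_equal_get_author_link := by
  intro author _hDom hPre
  unfold Spec_get_author_link
  apply String.toList_inj.mp
  have hbad : ¬ ("Citarelli.Dunn.W".toList <:+: author.toList) := by
    unfold Pre_get_author_link at hPre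
    exact (PySem.Chars.isIn_eq_false_iff _ _).mp (by simpa using hPre)
  have hA1 : ∀ s : List Char, PySem.Chars.replace s "Brostrom.A".toList
      "[Brostrom.A](https://github.com/ColdEvul)".toList = pvRep1 s := fun s =>
    replace_eq_pvRep 'B' "rostrom.A".toList _ s
  have hA2 : ∀ s : List Char, PySem.Chars.replace s "Dunn.W".toList
      "[Dunn.W](https://github.com/VinoEtCaseus)".toList = pvRep2 s := fun s =>
    replace_eq_pvRep 'D' "unn.W".toList _ s
  have hA3 : ∀ s : List Char, PySem.Chars.replace s "Citarelli.D".toList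
      "[Citarelli.D](https://github.com/davidcit646)".toList = pvRep3 s := fun s =>
    replace_eq_pvRep 'C' "itarelli.D".toList _ s
  have e1 : ("[" ++ "Brostrom.A" ++ "](https://github.com/" ++ "ColdEvul" ++ ")" : String)
      = "[Brostrom.A](https://github.com/ColdEvul)" := by decide
  have e2 : ("[" ++ "Dunn.W" ++ "](https://github.com/" ++ "VinoEtCaseus" ++ ")" : String)
      = "[Dunn.W](https://github.com/VinoEtCaseus)" := by decide
  have e3 : ("[" ++ "Citarelli.D" ++ "](https://github.com/" ++ "davidcit646" ++ ")" : String)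
      = "[Citarelli.D](https://github.com/davidcit646)" := by decide
  simp only [get_author_link, get_author_link_alt, pvNames, List.foldl, e1, e2, e3,
    PySem.Str.toList_replace, String.toList_ofList, hA1, hA2, hA3]
  exact pv_main author.toList.length author.toList (le_refl _) hbad
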